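-- pv_equiv track=rewrite | github.com/delekta/agh-asd | 1.3sort-task/SORT028.py | counting_sort_int_div
-- ===== SOURCE A (Python) =====
-- def counting_sort_int_div(A, n):
--     B = [0] * len(A)
--     C = [0] * n
--     for i in range(len(A)):
--         C[A[i] // n] += 1
--     for j in range(1, n):
--         C[j] += C[j - 1]
--         # we must take elements from the end to make counting sort stable
--     for k in range(len(A) - 1, -1, -1):
--         C[A[k] // n] -= 1    # sum of prefix elements
--         B[C[A[k] // n]] = A[k]
--     return B
-- ===== SOURCE B (Python) =====
-- def counting_sort_int_div(A, n):
--     buckets = [[] for _ in range(n)]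
--     for x in A:
--         buckets[x // n].append(x)
--     result = []
--     for b in buckets:
--         result.extend(b)
--     return result
-- ===== Notes on version B (the rewrite author's own statement) =====
-- stated objective: simpler
-- what changed: Replaces the count array, the prefix-sum pass and the reverse placement pass with per-key bucket lists filled in one forward pass and then concatenated in key order.
import Mathlib
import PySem

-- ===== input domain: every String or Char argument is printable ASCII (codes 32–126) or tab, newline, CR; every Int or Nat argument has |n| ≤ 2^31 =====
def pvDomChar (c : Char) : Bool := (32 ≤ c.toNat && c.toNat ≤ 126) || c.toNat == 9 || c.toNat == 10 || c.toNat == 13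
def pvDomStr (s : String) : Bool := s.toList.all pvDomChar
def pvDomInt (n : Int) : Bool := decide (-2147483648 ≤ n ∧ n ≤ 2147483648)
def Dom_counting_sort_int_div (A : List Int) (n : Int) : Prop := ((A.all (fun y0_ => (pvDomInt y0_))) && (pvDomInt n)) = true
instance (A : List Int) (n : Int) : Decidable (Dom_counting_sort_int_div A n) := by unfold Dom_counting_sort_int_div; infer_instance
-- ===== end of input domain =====

-- B replaces A's count array + prefix-sum pass + reverse placement pass by per-key bucket
-- lists filled in one forward pass and concatenated (objective: simpler).

-- ===== PORT A =====
-- Python lists are random-access; C and B are held as Arrays so the port evaluates in the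
-- same asymptotic time as the Python; csAGet/csASet are Python's (wrapping) indexed
-- get/set, defined via PySem's index rule pyIdx? (proved equal to pyGetD/pySetD below).
def csAGet {α : Type} (xs : Array α) (i : Int) (d : α) : α :=
  match PySem.List.pyIdx? xs.size i with
  | some k => xs.getD k d
  | none => d

def csASet {α : Type} (xs : Array α) (i : Int) (v : α) : Array α :=
  match PySem.List.pyIdx? xs.size i with
  | some k => xs.setIfInBounds k v
  | none => xs

def counting_sort_int_div (A : List Int) (n : Int) : List Int :=
  let B : Array Int := Array.replicate A.length 0
  let C : Array Int := Array.replicate n.toNat 0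
  let C := (PySem.List.pyRange 0 (A.length : Int) 1).foldl
    (fun C i =>
      csASet C (PySem.Int.floordiv (PySem.List.pyGetD A i 0) n)
        (csAGet C (PySem.Int.floordiv (PySem.List.pyGetD A i 0) n) 0 + 1)) C
  let C := (PySem.List.pyRange 1 n 1).foldl
    (fun C j =>
      csASet C j (csAGet C j 0 + csAGet C (j - 1) 0)) C
  let CB := (PySem.List.pyRange ((A.length : Int) - 1) (-1) (-1)).foldl
    (fun (CB : Array Int × Array Int) k =>
      let C := csASet CB.1 (PySem.Int.floordiv (PySem.List.pyGetD A k 0) n)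
        (csAGet CB.1 (PySem.Int.floordiv (PySem.List.pyGetD A k 0) n) 0 - 1)
      let B := csASet CB.2
        (csAGet C (PySem.Int.floordiv (PySem.List.pyGetD A k 0) n) 0)
        (PySem.List.pyGetD A k 0)
      (C, B)) (C, B)
  CB.2.toList

-- ===== PORT B =====
def counting_sort_int_div_alt (A : List Int) (n : Int) : List Int :=
  let buckets : List (List Int) := (PySem.List.pyRange 0 n 1).map (fun _ => [])
  let buckets := A.foldl
    (fun bs x =>
      PySem.List.pySetD bs (PySem.Int.floordiv x n)
        (PySem.List.pyGetD bs (PySem.Int.floordiv x n) [] ++ [x])) buckets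
  buckets.foldl (fun r b => r ++ b) []

-- ===== PRECONDITION & SPEC =====
-- Pre_ is exactly where the Python A returns: an empty list (any n), or n ≥ 1 with every
-- element's key A[i]//n inside Python's (possibly negative, wrapping) index range [-n, n).
def Pre_counting_sort_int_div (A : List Int) (n : Int) : Prop :=
  A = [] ∨ (1 ≤ n ∧ ∀ x ∈ A, -(n * n) ≤ x ∧ x < n * n)
instance (A : List Int) (n : Int) : Decidable (Pre_counting_sort_int_div A n) := by
  unfold Pre_counting_sort_int_div; infer_instance

def pvWitness_counting_sort_int_div : List Int × Int := ([7, -3, 0, 8, 5, -9], 3)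

def Spec_counting_sort_int_div (A : List Int) (n : Int) (out : List Int) : Prop := out = counting_sort_int_div_alt A n
instance (A : List Int) (n : Int) (out : List Int) : Decidable (Spec_counting_sort_int_div A n out) := by unfold Spec_counting_sort_int_div; infer_instance

-- ===== CLAIM (what is proved, stated in full; the proofs are below) =====
def Claim_equal_counting_sort_int_div : Prop := ∀ (A : List Int) (n : Int), Dom_counting_sort_int_div A n → Pre_counting_sort_int_div A n → Spec_counting_sort_int_div A n (counting_sort_int_div A n)


-- ===== LEMMAS AND PROOFS =====

-- the same computation with plain lists and the PySem list primitives, used by the proofs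
def csListImpl (A : List Int) (n : Int) : List Int :=
  let B : List Int := List.replicate A.length 0
  let C : List Int := List.replicate n.toNat 0
  let C := (PySem.List.pyRange 0 (A.length : Int) 1).foldl
    (fun C i =>
      PySem.List.pySetD C (PySem.Int.floordiv (PySem.List.pyGetD A i 0) n)
        (PySem.List.pyGetD C (PySem.Int.floordiv (PySem.List.pyGetD A i 0) n) 0 + 1)) C
  let C := (PySem.List.pyRange 1 n 1).foldl
    (fun C j =>
      PySem.List.pySetD C j (PySem.List.pyGetD C j 0 + PySem.List.pyGetD C (j - 1) 0)) C
  let CB := (PySem.List.pyRange ((A.length : Int) - 1) (-1) (-1)).foldl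
    (fun (CB : List Int × List Int) k =>
      let C := PySem.List.pySetD CB.1 (PySem.Int.floordiv (PySem.List.pyGetD A k 0) n)
        (PySem.List.pyGetD CB.1 (PySem.Int.floordiv (PySem.List.pyGetD A k 0) n) 0 - 1)
      let B := PySem.List.pySetD CB.2
        (PySem.List.pyGetD C (PySem.Int.floordiv (PySem.List.pyGetD A k 0) n) 0)
        (PySem.List.pyGetD A k 0)
      (C, B)) (C, B)
  CB.2

theorem csAGet_eq {α : Type} (xs : Array α) (i : Int) (d : α) :
    csAGet xs i d = PySem.List.pyGetD xs.toList i d := by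
  unfold csAGet PySem.List.pyGetD PySem.List.pyGet?
  rw [Array.length_toList]
  cases h : PySem.List.pyIdx? xs.size i
  · simp
  · simp [Array.getD_eq_getD_getElem?, Array.getElem?_toList]

theorem csASet_eq {α : Type} (xs : Array α) (i : Int) (v : α) :
    (csASet xs i v).toList = PySem.List.pySetD xs.toList i v := by
  unfold csASet PySem.List.pySetD PySem.List.pySet?
  rw [Array.length_toList]
  cases h : PySem.List.pyIdx? xs.size i
  · simp
  · simp [Array.toList_setIfInBounds]

theorem csPortA_eq_list (A : List Int) (n : Int) :
    counting_sort_int_div A n = csListImpl A n := by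
  unfold counting_sort_int_div csListImpl
  dsimp only
  have H1 : ∀ (x : Array Int) (y : Int),
      PySem.List.pySetD x.toList (PySem.Int.floordiv (PySem.List.pyGetD A y 0) n)
        (PySem.List.pyGetD x.toList (PySem.Int.floordiv (PySem.List.pyGetD A y 0) n) 0 + 1)
      = (csASet x (PySem.Int.floordiv (PySem.List.pyGetD A y 0) n)
          (csAGet x (PySem.Int.floordiv (PySem.List.pyGetD A y 0) n) 0 + 1)).toList := by
    intro x y
    rw [csASet_eq, csAGet_eq]
  have H2 : ∀ (x : Array Int) (y : Int),
      PySem.List.pySetD x.toList y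
        (PySem.List.pyGetD x.toList y 0 + PySem.List.pyGetD x.toList (y - 1) 0)
      = (csASet x y (csAGet x y 0 + csAGet x (y - 1) 0)).toList := by
    intro x y
    rw [csASet_eq, csAGet_eq, csAGet_eq]
  have H3 : ∀ (p : Array Int × Array Int) (y : Int),
      (fun (CB : List Int × List Int) k =>
        let C := PySem.List.pySetD CB.1 (PySem.Int.floordiv (PySem.List.pyGetD A k 0) n)
          (PySem.List.pyGetD CB.1 (PySem.Int.floordiv (PySem.List.pyGetD A k 0) n) 0 - 1)
        let B := PySem.List.pySetD CB.2
          (PySem.List.pyGetD C (PySem.Int.floordiv (PySem.List.pyGetD A k 0) n) 0)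
          (PySem.List.pyGetD A k 0)
        (C, B)) (p.1.toList, p.2.toList) y
      = ((fun (CB : Array Int × Array Int) k =>
        let C := csASet CB.1 (PySem.Int.floordiv (PySem.List.pyGetD A k 0) n)
          (csAGet CB.1 (PySem.Int.floordiv (PySem.List.pyGetD A k 0) n) 0 - 1)
        let B := csASet CB.2
          (csAGet C (PySem.Int.floordiv (PySem.List.pyGetD A k 0) n) 0)
          (PySem.List.pyGetD A k 0)
        (C, B)) p y |> fun q => (q.1.toList, q.2.toList)) := by
    intro p y
    dsimp only
    simp only [csASet_eq, csAGet_eq]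
  have hC1 : (PySem.List.pyRange 0 (A.length : Int) 1).foldl
      (fun C i =>
        PySem.List.pySetD C (PySem.Int.floordiv (PySem.List.pyGetD A i 0) n)
          (PySem.List.pyGetD C (PySem.Int.floordiv (PySem.List.pyGetD A i 0) n) 0 + 1))
      ((Array.replicate n.toNat (0 : Int)).toList)
      = ((PySem.List.pyRange 0 (A.length : Int) 1).foldl
        (fun C i =>
          csASet C (PySem.Int.floordiv (PySem.List.pyGetD A i 0) n)
            (csAGet C (PySem.Int.floordiv (PySem.List.pyGetD A i 0) n) 0 + 1))
        (Array.replicate n.toNat (0 : Int))).toList :=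
    List.foldl_hom Array.toList H1
  have hC2 : (PySem.List.pyRange 1 n 1).foldl
      (fun C j =>
        PySem.List.pySetD C j (PySem.List.pyGetD C j 0 + PySem.List.pyGetD C (j - 1) 0))
      (((PySem.List.pyRange 0 (A.length : Int) 1).foldl
        (fun C i =>
          csASet C (PySem.Int.floordiv (PySem.List.pyGetD A i 0) n)
            (csAGet C (PySem.Int.floordiv (PySem.List.pyGetD A i 0) n) 0 + 1))
        (Array.replicate n.toNat (0 : Int))).toList)
      = ((PySem.List.pyRange 1 n 1).foldl
        (fun C j => csASet C j (csAGet C j 0 + csAGet C (j - 1) 0))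
        ((PySem.List.pyRange 0 (A.length : Int) 1).foldl
          (fun C i =>
            csASet C (PySem.Int.floordiv (PySem.List.pyGetD A i 0) n)
              (csAGet C (PySem.Int.floordiv (PySem.List.pyGetD A i 0) n) 0 + 1))
          (Array.replicate n.toNat (0 : Int)))).toList :=
    List.foldl_hom Array.toList H2
  rw [show List.replicate n.toNat (0 : Int) = (Array.replicate n.toNat (0 : Int)).toList from
        Array.toList_replicate.symm,
      show List.replicate A.length (0 : Int) = (Array.replicate A.length (0 : Int)).toList from
        Array.toList_replicate.symm,
      hC1, hC2]
  exact congrArg Prod.snd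
    (List.foldl_hom (fun p : Array Int × Array Int => (p.1.toList, p.2.toList)) H3).symm

-- helper notions used only by the proofs: the (wrapped) bucket index of x, per-bucket
-- counts/contents of a list, and the starting offset of each bucket

def csKey (n x : Int) : Nat := (PySem.Int.mod (PySem.Int.floordiv x n) n).toNat
def csCnt (n : Int) (S : List Int) (j : Nat) : Nat := S.countP (fun x => decide (csKey n x = j))
def csBucket (n : Int) (S : List Int) (j : Nat) : List Int := S.filter (fun x => decide (csKey n x = j))
def csOff (n : Int) (A : List Int) (j : Nat) : Nat := ((List.range j).map (csCnt n A)).sum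

theorem csKey_lt {n : Int} (hn : 1 ≤ n) (x : Int) : csKey n x < n.toNat := by
  unfold csKey
  have h1 := PySem.Int.mod_nonneg (PySem.Int.floordiv x n) (by omega : (0:Int) < n)
  have h2 := PySem.Int.mod_lt (PySem.Int.floordiv x n) (by omega : (0:Int) < n)
  omega

theorem csFd_bounds {n x : Int} (hn : 1 ≤ n) (h1 : -(n * n) ≤ x) (h2 : x < n * n) :
    -n ≤ PySem.Int.floordiv x n ∧ PySem.Int.floordiv x n < n := by
  constructor
  · rw [PySem.Int.le_floordiv_iff_mul_le (by omega)]; nlinarith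
  · rw [PySem.Int.floordiv_lt_iff_lt_mul (by omega)]; nlinarith

theorem csIdx_eq {n j : Int} (hn : 1 ≤ n) (h1 : -n ≤ j) (h2 : j < n) :
    PySem.List.pyIdx? n.toNat j = some (PySem.Int.mod j n).toNat := by
  have hmod : PySem.Int.mod j n = j % n := PySem.Int.mod_eq_emod_of_pos (by omega)
  by_cases h0 : 0 ≤ j
  · have : j % n = j := Int.emod_eq_of_lt h0 h2
    simp [PySem.List.pyIdx?, h0, hmod, this, h2]
  · have hje : j % n = j + n := by
      have h3 : (j + n) % n = j % n := Int.add_mul_emod_self_left j n 1 ▸ by ring_nf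
      rw [← h3, Int.emod_eq_of_lt (by omega) (by omega)]
    simp [PySem.List.pyIdx?, h0, hmod, hje]
    omega

theorem csSetD_wrap {α : Type} {n j : Int} {L : List α} (hn : 1 ≤ n)
    (hL : L.length = n.toNat) (h1 : -n ≤ j) (h2 : j < n) (v : α) :
    PySem.List.pySetD L j v = L.set (PySem.Int.mod j n).toNat v := by
  simp [PySem.List.pySetD, PySem.List.pySet?, hL, csIdx_eq hn h1 h2]

theorem csGetD_wrap {α : Type} {n j : Int} {L : List α} (hn : 1 ≤ n)
    (hL : L.length = n.toNat) (h1 : -n ≤ j) (h2 : j < n) (d : α) :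
    PySem.List.pyGetD L j d = L.getD (PySem.Int.mod j n).toNat d := by
  simp [PySem.List.pyGetD, PySem.List.pyGet?, hL, csIdx_eq hn h1 h2, List.getD_eq_getElem?_getD]

theorem csRangeMap_set {α : Type} (g : Nat → α) (N k : Nat) (v : α) (_hk : k < N) :
    ((List.range N).map g).set k v = (List.range N).map (fun j => if j = k then v else g j) := by
  apply List.ext_getElem
  · simp
  · intro i hi hi'
    simp only [List.getElem_set, List.getElem_map, List.getElem_range] at *
    by_cases h : k = i
    · simp [h]
    · simp [h]
      omega

theorem csRangeMap_getD {α : Type} (g : Nat → α) (N k : Nat) (d : α) (hk : k < N) :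
    ((List.range N).map g).getD k d = g k := by
  rw [List.getD_eq_getElem?_getD]
  simp [hk]

-- stage 1: the counting loop of A turns base values g into g + per-bucket counts
theorem csCounts_fold {n : Int} (hn : 1 ≤ n) :
    ∀ (S : List Int) (g : Nat → Int), (∀ x ∈ S, -(n * n) ≤ x ∧ x < n * n) →
      S.foldl (fun C x =>
          PySem.List.pySetD C (PySem.Int.floordiv x n)
            (PySem.List.pyGetD C (PySem.Int.floordiv x n) 0 + 1))
        ((List.range n.toNat).map g)
      = (List.range n.toNat).map (fun j => g j + (csCnt n S j : Int)) := by
  intro S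
  induction S with
  | nil => intro g _; simp [csCnt]
  | cons x S ih =>
    intro g hb
    have hx := hb x (by simp)
    obtain ⟨hfd1, hfd2⟩ := csFd_bounds hn hx.1 hx.2
    have hlen : ((List.range n.toNat).map g).length = n.toNat := by simp
    have hk : (PySem.Int.mod (PySem.Int.floordiv x n) n).toNat < n.toNat := csKey_lt hn x
    rw [List.foldl_cons, csGetD_wrap hn hlen hfd1 hfd2, csSetD_wrap hn hlen hfd1 hfd2,
      csRangeMap_getD g _ _ _ hk, csRangeMap_set g _ _ _ hk,
      ih _ (fun y hy => hb y (by simp [hy]))]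
    apply List.map_congr_left
    intro j hj
    have hcnt : csCnt n (x :: S) j = csCnt n S j + (if csKey n x = j then 1 else 0) := by
      unfold csCnt; rw [List.countP_cons]; simp
    by_cases h : j = (PySem.Int.mod (PySem.Int.floordiv x n) n).toNat
    · have h' : csKey n x = j := h.symm
      simp only [h] at *
      rw [hcnt, if_pos h']
      push_cast; ring
    · have h' : ¬ (csKey n x = j) := fun hc => h (hc.symm)
      rw [if_neg h, hcnt, if_neg h']
      push_cast; ring

-- stage 2: the prefix-sum loop of A turns per-bucket values c into inclusive prefix sums
theorem csPrefix_fold {n : Int} (hn : 1 ≤ n) (c : Nat → Int) :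
    (PySem.List.pyRange 1 n 1).foldl (fun C j =>
        PySem.List.pySetD C j (PySem.List.pyGetD C j 0 + PySem.List.pyGetD C (j - 1) 0))
      ((List.range n.toNat).map c)
    = (List.range n.toNat).map (fun j => ((List.range (j + 1)).map c).sum) := by
  have aux : ∀ m : Nat, m < n.toNat →
      (PySem.List.pyRange 1 ((1 + m : Nat) : Int) 1).foldl (fun C j =>
          PySem.List.pySetD C j (PySem.List.pyGetD C j 0 + PySem.List.pyGetD C (j - 1) 0))
        ((List.range n.toNat).map c)
      = (List.range n.toNat).map
          (fun j => if j ≤ m then ((List.range (j + 1)).map c).sum else c j) := by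
    intro m
    induction m with
    | zero =>
      intro _
      have h1 : ((1 + 0 : Nat) : Int) = 1 := by norm_num
      rw [h1, PySem.List.pyRange_one_eq_nil (le_refl 1), List.foldl_nil]
      apply List.map_congr_left
      intro j _
      by_cases hj : j ≤ 0
      · have : j = 0 := by omega
        subst this; simp
      · rw [if_neg hj]
    | succ m ih =>
      intro hm
      have hcast : ((1 + (m + 1) : Nat) : Int) = ((1 + m : Nat) : Int) + 1 := by push_cast; ring
      rw [hcast, PySem.List.pyRange_one_succ_right (by exact_mod_cast Nat.le_add_right 1 m),
        List.foldl_append, ih (by omega), List.foldl_cons, List.foldl_nil]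
      have hsub : ((1 + m : Nat) : Int) - 1 = ((m : Nat) : Int) := by push_cast; ring
      rw [hsub, PySem.List.pySetD_natCast, PySem.List.pyGetD_natCast, PySem.List.pyGetD_natCast]
      have e1 : (List.map (fun j => if j ≤ m then ((List.range (j + 1)).map c).sum else c j)
          (List.range n.toNat)).getD (1 + m) 0 = c (1 + m) := by
        rw [csRangeMap_getD _ _ _ _ (by omega)]
        rw [if_neg (by omega)]
      have e2 : (List.map (fun j => if j ≤ m then ((List.range (j + 1)).map c).sum else c j)
          (List.range n.toNat)).getD m 0 = ((List.range (m + 1)).map c).sum := by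
        rw [csRangeMap_getD _ _ _ _ (by omega)]
        rw [if_pos (le_refl m)]
      rw [e1, e2, csRangeMap_set _ _ _ _ (by omega : 1 + m < n.toNat)]
      apply List.map_congr_left
      intro j _
      by_cases hj : j = 1 + m
      · subst hj
        rw [if_pos rfl, if_pos (by omega)]
        have h12 : (1 + m) + 1 = (m + 1) + 1 := by omega
        conv_rhs => rw [h12, List.range_succ, List.map_append, List.sum_append]
        simp only [List.map_cons, List.map_nil, List.sum_cons, List.sum_nil]
        rw [Nat.add_comm 1 m]
        ring
      · rw [if_neg hj]
        by_cases hj2 : j ≤ m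
        · rw [if_pos hj2, if_pos (by omega)]
        · rw [if_neg hj2, if_neg (by omega)]
  have hN : ((1 + (n.toNat - 1) : Nat) : Int) = n := by omega
  have haux := aux (n.toNat - 1) (by omega)
  rw [hN] at haux
  rw [haux]
  apply List.map_congr_left
  intro j hj
  rw [if_pos (by simp at hj; omega)]

theorem csCnt_cons (n x : Int) (S : List Int) (j : Nat) :
    csCnt n (x :: S) j = csCnt n S j + (if csKey n x = j then 1 else 0) := by
  unfold csCnt
  rw [List.countP_cons]
  by_cases h : csKey n x = j
  · simp [h]
  · simp [h]

theorem csBucket_cons (n x : Int) (S : List Int) (j : Nat) :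
    csBucket n (x :: S) j = if csKey n x = j then x :: csBucket n S j else csBucket n S j := by
  unfold csBucket
  rw [List.filter_cons]
  by_cases h : csKey n x = j
  · simp [h]
  · simp [h]

-- stage 3: the reverse placement loop of A, characterised position by position
theorem csPlace_fold {n : Int} (hn : 1 ≤ n) :
    ∀ (S : List Int) (f : Nat → Nat) (C B : List Int),
      (∀ x ∈ S, -(n * n) ≤ x ∧ x < n * n) →
      C = (List.range n.toNat).map (fun j => ((f j + csCnt n S j : Nat) : Int)) →
      (∀ j, j < n.toNat → f j + csCnt n S j ≤ B.length) →
      (∀ j j', j < j' → j' < n.toNat → f j + csCnt n S j ≤ f j') →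
      ∃ B' : List Int,
        S.reverse.foldl (fun (CB : List Int × List Int) x =>
            let C := PySem.List.pySetD CB.1 (PySem.Int.floordiv x n)
              (PySem.List.pyGetD CB.1 (PySem.Int.floordiv x n) 0 - 1)
            let B := PySem.List.pySetD CB.2
              (PySem.List.pyGetD C (PySem.Int.floordiv x n) 0) x
            (C, B)) (C, B)
          = ((List.range n.toNat).map (fun j => ((f j : Nat) : Int)), B')
        ∧ B'.length = B.length
        ∧ (∀ j o, j < n.toNat → o < csCnt n S j → B'[f j + o]? = (csBucket n S j)[o]?)
        ∧ (∀ p, (∀ j, j < n.toNat → ¬(f j ≤ p ∧ p < f j + csCnt n S j)) → B'[p]? = B[p]?) := by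
  intro S
  induction S with
  | nil =>
    intro f C B _ hC _ _
    refine ⟨B, ?_, rfl, ?_, ?_⟩
    · rw [List.reverse_nil, List.foldl_nil, hC]
      refine Prod.ext ?_ rfl
      simp only
      apply List.map_congr_left
      intro j _
      simp [csCnt]
    · intro j o _ ho
      simp [csCnt] at ho
    · intro p _
      rfl
  | cons x S ih =>
    intro f C B hb hC hin hsep
    have hx := hb x (by simp)
    obtain ⟨hfd1, hfd2⟩ := csFd_bounds hn hx.1 hx.2
    obtain ⟨k, hkdef⟩ : ∃ k, (PySem.Int.mod (PySem.Int.floordiv x n) n).toNat = k := ⟨_, rfl⟩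
    have hk : k < n.toNat := hkdef ▸ csKey_lt hn x
    have hkk : csKey n x = k := hkdef
    have hcnt_cons : ∀ j, csCnt n (x :: S) j
        = csCnt n S j + (if csKey n x = j then 1 else 0) := fun j => csCnt_cons n x S j
    have hcntk : csCnt n (x :: S) k = csCnt n S k + 1 := by
      rw [hcnt_cons, if_pos hkk]
    have hcnt_ne : ∀ j, j ≠ k → csCnt n (x :: S) j = csCnt n S j := by
      intro j hj
      rw [hcnt_cons, hkk, if_neg (fun hc => hj hc.symm)]
      omega
    obtain ⟨B1, hfold1, hlen1, ha1, hb1⟩ :=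
      ih (fun j => if j = k then f j + 1 else f j) C B
        (fun y hy => hb y (by simp [hy]))
        (by
          rw [hC]
          apply List.map_congr_left
          intro j _
          beta_reduce
          by_cases hj : j = k
          · subst hj; rw [if_pos rfl]; omega
          · rw [if_neg hj]; have := hcnt_ne j hj; omega)
        (by
          intro j hj
          beta_reduce
          have h1 := hin j hj
          by_cases h : j = k
          · subst h; rw [if_pos rfl]; omega
          · rw [if_neg h]; have := hcnt_ne j h; omega)
        (by
          intro j j' hjj hj'
          beta_reduce
          have h1 := hsep j j' hjj hj'
          by_cases h : j = k
          · subst h; rw [if_pos rfl, if_neg (by omega)]; omega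
          · rw [if_neg h]
            have h2 := hcnt_ne j h
            by_cases h' : j' = k
            · subst h'; rw [if_pos rfl]; omega
            · rw [if_neg h']; omega)
    have hC1len : ((List.range n.toNat).map
        (fun j => ((if j = k then f j + 1 else f j : Nat) : Int))).length = n.toNat := by simp
    have hfk_lt : f k < B.length := by
      have := hin k hk; omega
    refine ⟨B1.set (f k) x, ?_, ?_, ?_, ?_⟩
    · rw [List.reverse_cons, List.foldl_append, hfold1, List.foldl_cons, List.foldl_nil]
      dsimp only
      have eg1 : PySem.List.pyGetD ((List.range n.toNat).map
          (fun j => ((if j = k then f j + 1 else f j : Nat) : Int))) (PySem.Int.floordiv x n) 0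
          = ((f k + 1 : Nat) : Int) := by
        rw [csGetD_wrap hn hC1len hfd1 hfd2, hkdef, csRangeMap_getD _ _ _ _ hk]
        rw [if_pos rfl]
      rw [eg1]
      have hv : ((f k + 1 : Nat) : Int) - 1 = ((f k : Nat) : Int) := by push_cast; ring
      rw [hv, csSetD_wrap hn hC1len hfd1 hfd2, hkdef]
      have hkC1 : k < ((List.range n.toNat).map
          (fun j => ((if j = k then f j + 1 else f j : Nat) : Int))).length := by
        rw [hC1len]; exact hk
      have eg2 : PySem.List.pyGetD (((List.range n.toNat).map
          (fun j => ((if j = k then f j + 1 else f j : Nat) : Int))).set k ((f k : Nat) : Int))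
          (PySem.Int.floordiv x n) 0 = ((f k : Nat) : Int) := by
        rw [csGetD_wrap hn (by simp) hfd1 hfd2, hkdef, List.getD_eq_getElem?_getD,
          List.getElem?_set_self hkC1]
        rfl
      rw [eg2, PySem.List.pySetD_natCast]
      refine Prod.ext ?_ rfl
      simp only
      rw [csRangeMap_set _ _ _ _ hk]
      apply List.map_congr_left
      intro j _
      beta_reduce
      by_cases hj : j = k
      · subst hj; rw [if_pos rfl]
      · rw [if_neg hj, if_neg hj]
    · rw [List.length_set]; exact hlen1
    · intro j o hj ho
      have hbk : csBucket n (x :: S) j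
          = if csKey n x = j then x :: csBucket n S j else csBucket n S j :=
        csBucket_cons n x S j
      by_cases hjk : j = k
      · subst hjk
        rw [hbk, if_pos hkk]
        cases o with
        | zero =>
          rw [Nat.add_zero]
          rw [List.getElem?_set_self (by omega)]
          rfl
        | succ o' =>
          rw [List.getElem?_set_ne (by omega)]
          have hpos : f j + (o' + 1) = (if j = j then f j + 1 else f j) + o' := by
            rw [if_pos rfl]; omega
          rw [hpos, ha1 j o' hj (by omega)]
          simp
      · rw [hbk, hkk, if_neg (fun hc => hjk hc.symm)]
        have hne : f k ≠ f j + o := by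
          rcases Nat.lt_or_ge j k with hlt | hge
          · have := hsep j k hlt hk
            omega
          · have hgt : k < j := by omega
            have := hsep k j hgt hj
            omega
        rw [List.getElem?_set_ne hne]
        have hpos : f j + o = (if j = k then f j + 1 else f j) + o := by
          rw [if_neg hjk]
        rw [hpos, ha1 j o hj (by have := hcnt_ne j hjk; omega)]
    · intro p hp
      have hpk := hp k hk
      rw [List.getElem?_set_ne (by omega)]
      apply hb1
      intro j hj
      have hpj := hp j hj
      by_cases h : j = k
      · subst h
        rw [if_pos rfl]
        omega
      · rw [if_neg h]
        have := hcnt_ne j h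
        omega

theorem csBuckets_fold {n : Int} (hn : 1 ≤ n) :
    ∀ (S : List Int) (g : Nat → List Int), (∀ x ∈ S, -(n * n) ≤ x ∧ x < n * n) →
      S.foldl (fun bs x =>
          PySem.List.pySetD bs (PySem.Int.floordiv x n)
            (PySem.List.pyGetD bs (PySem.Int.floordiv x n) [] ++ [x]))
        ((List.range n.toNat).map g)
      = (List.range n.toNat).map (fun j => g j ++ csBucket n S j) := by
  intro S
  induction S with
  | nil => intro g _; simp [csBucket]
  | cons x S ih =>
    intro g hb
    have hx := hb x (by simp)
    obtain ⟨hfd1, hfd2⟩ := csFd_bounds hn hx.1 hx.2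
    have hlen : ((List.range n.toNat).map g).length = n.toNat := by simp
    have hk : (PySem.Int.mod (PySem.Int.floordiv x n) n).toNat < n.toNat := csKey_lt hn x
    rw [List.foldl_cons, csGetD_wrap hn hlen hfd1 hfd2, csSetD_wrap hn hlen hfd1 hfd2,
      csRangeMap_getD g _ _ _ hk, csRangeMap_set g _ _ _ hk,
      ih _ (fun y hy => hb y (by simp [hy]))]
    apply List.map_congr_left
    intro j hj
    have hbk : csBucket n (x :: S) j
        = (if csKey n x = j then [x] else []) ++ csBucket n S j := by
      unfold csBucket; rw [List.filter_cons]; split_ifs with h1 h2 h3 <;> simp_all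
    by_cases h : j = (PySem.Int.mod (PySem.Int.floordiv x n) n).toNat
    · have h' : csKey n x = j := h.symm
      rw [if_pos h, hbk, if_pos h']
      simp [h]
    · have h' : ¬ (csKey n x = j) := fun hc => h (hc.symm)
      rw [if_neg h, hbk, if_neg h']
      simp

theorem csOff_succ (n : Int) (A : List Int) (j : Nat) :
    csOff n A (j + 1) = csOff n A j + csCnt n A j := by
  unfold csOff
  rw [List.range_succ, List.map_append, List.sum_append]
  simp

theorem csOff_mono (n : Int) (A : List Int) {j j' : Nat} (h : j ≤ j') :
    csOff n A j ≤ csOff n A j' := by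
  induction j', h using Nat.le_induction with
  | base => exact le_refl _
  | succ j' hj ih =>
    rw [csOff_succ]
    omega

theorem csSum_split (N : Nat) (f g : Nat → Nat) :
    ((List.range N).map (fun j => f j + g j)).sum
      = ((List.range N).map f).sum + ((List.range N).map g).sum := by
  induction N with
  | zero => simp
  | succ N ih =>
    rw [List.range_succ]
    simp [ih]
    omega

theorem csInd_sum (N k : Nat) (hk : k < N) :
    ((List.range N).map (fun j => if k = j then 1 else 0)).sum = 1 := by
  induction N with
  | zero => omega
  | succ N ih =>
    rw [List.range_succ, List.map_append, List.sum_append]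
    by_cases h : k = N
    · subst h
      have h0 : ((List.range k).map (fun j => if k = j then 1 else 0)).sum = 0 := by
        apply List.sum_eq_zero
        intro y hy
        simp only [List.mem_map, List.mem_range] at hy
        obtain ⟨j, hj, rfl⟩ := hy
        rw [if_neg (by omega)]
      rw [h0]
      simp
    · rw [ih (by omega)]
      simp [h]

theorem csOff_total {n : Int} (hn : 1 ≤ n) (A : List Int) :
    csOff n A n.toNat = A.length := by
  induction A with
  | nil =>
    unfold csOff
    rw [List.length_nil]
    apply List.sum_eq_zero
    intro y hy
    simp only [List.mem_map] at hy
    obtain ⟨j, _, rfl⟩ := hy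
    rfl
  | cons x A ih =>
    unfold csOff
    have h1 : (List.range n.toNat).map (csCnt n (x :: A))
        = (List.range n.toNat).map (fun j => csCnt n A j + (if csKey n x = j then 1 else 0)) :=
      List.map_congr_left (fun j _ => csCnt_cons n x A j)
    rw [h1, csSum_split, csInd_sum n.toNat (csKey n x) (csKey_lt hn x)]
    have ih' : ((List.range n.toNat).map (csCnt n A)).sum = A.length := ih
    rw [ih']
    simp

theorem csOff_cover {n : Int} (A : List Int) :
    ∀ (N p : Nat), p < csOff n A N →
      ∃ j, j < N ∧ csOff n A j ≤ p ∧ p < csOff n A j + csCnt n A j := by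
  intro N
  induction N with
  | zero => intro p hp; simp [csOff] at hp
  | succ N ih =>
    intro p hp
    by_cases h : p < csOff n A N
    · obtain ⟨j, h1, h2, h3⟩ := ih p h
      exact ⟨j, by omega, h2, h3⟩
    · have hs := csOff_succ n A N
      exact ⟨N, by omega, by omega, by omega⟩

theorem csFlat_length (n : Int) (A : List Int) (N : Nat) :
    (((List.range N).flatMap (csBucket n A))).length = csOff n A N := by
  induction N with
  | zero => simp [csOff]
  | succ N ih =>
    rw [List.range_succ, List.flatMap_append, List.length_append, ih, csOff_succ]
    have hb : (List.flatMap (csBucket n A) [N]).length = csCnt n A N := by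
      simp [csBucket, csCnt, List.countP_eq_length_filter]
    omega

theorem csFlat_getElem (n : Int) (A : List Int) :
    ∀ (N j o : Nat), j < N → o < csCnt n A j →
      ((List.range N).flatMap (csBucket n A))[csOff n A j + o]? = (csBucket n A j)[o]? := by
  intro N
  induction N with
  | zero => intro j o hj ho; omega
  | succ N ih =>
    intro j o hj ho
    rw [List.range_succ, List.flatMap_append]
    by_cases h : j < N
    · rw [List.getElem?_append_left (by
        rw [csFlat_length]
        have h1 := csOff_succ n A j
        have h2 := csOff_mono n A (show j + 1 ≤ N by omega)
        omega)]
      exact ih j o h ho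
    · have hjN : j = N := by omega
      subst hjN
      rw [List.getElem?_append_right (by rw [csFlat_length]; omega), csFlat_length]
      have he : csOff n A j + o - csOff n A j = o := by omega
      rw [he]
      simp

-- both sides return [] on the empty list (any n, including n ≤ 0)
theorem csNil (n : Int) : counting_sort_int_div [] n = counting_sort_int_div_alt [] n := by
  rw [csPortA_eq_list]
  unfold csListImpl counting_sort_int_div_alt
  dsimp only
  rw [show ((List.length ([] : List Int) : Int)) = (0 : Int) by simp]
  rw [PySem.List.pyRange_one_eq_nil (le_refl 0), List.foldl_nil,
    PySem.List.pyRange_neg_one_eq_nil (by norm_num), List.foldl_nil, List.foldl_nil]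
  rw [PySem.List.foldl_append_eq_flatMap (fun b => b)]
  simp

theorem csAlt_eq_flatMap {n : Int} (hn : 1 ≤ n) (A : List Int)
    (hA : ∀ x ∈ A, -(n * n) ≤ x ∧ x < n * n) :
    counting_sort_int_div_alt A n = (List.range n.toNat).flatMap (csBucket n A) := by
  unfold counting_sort_int_div_alt
  dsimp only
  have h0 : (PySem.List.pyRange 0 n 1).map (fun _ => ([] : List Int))
      = (List.range n.toNat).map (fun _ => ([] : List Int)) := by
    rw [List.map_const', List.map_const', PySem.List.length_pyRange_one, List.length_range]
    norm_num
  rw [h0, csBuckets_fold hn A (fun _ => []) hA,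
    PySem.List.foldl_append_eq_flatMap (fun b => b)]
  have h1 : (List.range n.toNat).map (fun j => ([] : List Int) ++ csBucket n A j)
      = (List.range n.toNat).map (csBucket n A) :=
    List.map_congr_left (fun j _ => List.nil_append _)
  rw [h1, List.nil_append, List.flatMap_def, List.flatMap_def, List.map_id']

theorem csCounts_conv {n : Int} (hn : 1 ≤ n) (A : List Int) (g : Nat → Int)
    (hA : ∀ x ∈ A, -(n * n) ≤ x ∧ x < n * n) :
    (PySem.List.pyRange 0 (A.length : Int) 1).foldl
      (fun C i =>
        PySem.List.pySetD C (PySem.Int.floordiv (PySem.List.pyGetD A i 0) n)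
          (PySem.List.pyGetD C (PySem.Int.floordiv (PySem.List.pyGetD A i 0) n) 0 + 1))
      ((List.range n.toNat).map g)
    = (List.range n.toNat).map (fun j => g j + (csCnt n A j : Int)) := by
  have h := PySem.List.foldl_pyRange_zero_pyGetD' A 0
    (fun C x =>
      PySem.List.pySetD C (PySem.Int.floordiv x n)
        (PySem.List.pyGetD C (PySem.Int.floordiv x n) 0 + 1))
    ((List.range n.toNat).map g)
  exact h.trans (csCounts_fold hn A g hA)

theorem csRev_conv (A : List Int) (n : Int) (CB : List Int × List Int) :
    (PySem.List.pyRange ((A.length : Int) - 1) (-1) (-1)).foldl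
      (fun (CB : List Int × List Int) k =>
        let C := PySem.List.pySetD CB.1 (PySem.Int.floordiv (PySem.List.pyGetD A k 0) n)
          (PySem.List.pyGetD CB.1 (PySem.Int.floordiv (PySem.List.pyGetD A k 0) n) 0 - 1)
        let B := PySem.List.pySetD CB.2
          (PySem.List.pyGetD C (PySem.Int.floordiv (PySem.List.pyGetD A k 0) n) 0)
          (PySem.List.pyGetD A k 0)
        (C, B)) CB
    = A.reverse.foldl
      (fun (CB : List Int × List Int) x =>
        let C := PySem.List.pySetD CB.1 (PySem.Int.floordiv x n)
          (PySem.List.pyGetD CB.1 (PySem.Int.floordiv x n) 0 - 1)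
        let B := PySem.List.pySetD CB.2
          (PySem.List.pyGetD C (PySem.Int.floordiv x n) 0) x
        (C, B)) CB := by
  rw [PySem.List.pyRange_neg_one_eq_reverse]
  have h1 : (-1 : Int) + 1 = 0 := by ring
  have h2 : ((A.length : Int) - 1) + 1 = (A.length : Int) := by ring
  rw [h1, h2]
  conv_rhs => rw [← PySem.List.map_pyGetD_pyRange_zero' A 0]
  rw [← List.map_reverse, List.foldl_map]

theorem csMain {n : Int} (hn : 1 ≤ n) (A : List Int)
    (hA : ∀ x ∈ A, -(n * n) ≤ x ∧ x < n * n) :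
    counting_sort_int_div A n = counting_sort_int_div_alt A n := by
  rw [csPortA_eq_list]
  unfold csListImpl
  dsimp only
  have hC0 : List.replicate n.toNat (0 : Int) = (List.range n.toNat).map (fun _ => (0 : Int)) := by
    rw [List.map_const', List.length_range]
  rw [hC0, csCounts_conv hn A (fun _ => 0) hA]
  have hz : (List.range n.toNat).map (fun j => (0 : Int) + (csCnt n A j : Int))
      = (List.range n.toNat).map (fun j => (csCnt n A j : Int)) :=
    List.map_congr_left (fun j _ => by ring)
  rw [hz, csPrefix_fold hn (fun j => (csCnt n A j : Int))]
  have hps : (List.range n.toNat).map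
        (fun j => ((List.range (j + 1)).map (fun i => (csCnt n A i : Int))).sum)
      = (List.range n.toNat).map (fun j => ((csOff n A j + csCnt n A j : Nat) : Int)) := by
    apply List.map_congr_left
    intro j _
    rw [← csOff_succ]
    unfold csOff
    rw [Nat.cast_list_sum, List.map_map]
    rfl
  rw [hps, csRev_conv A n _]
  obtain ⟨B', hfold, hlenB, ha, hbp⟩ :=
    csPlace_fold hn A (csOff n A) _ (List.replicate A.length 0) hA rfl
      (by
        intro j hj
        rw [List.length_replicate, ← csOff_succ]
        have h2 := csOff_mono n A (show j + 1 ≤ n.toNat by omega)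
        rw [csOff_total hn] at h2
        exact h2)
      (by
        intro j j' hjj hj'
        rw [← csOff_succ]
        exact csOff_mono n A (by omega))
  rw [hfold]
  dsimp only
  rw [csAlt_eq_flatMap hn A hA]
  apply List.ext_getElem?
  intro p
  by_cases hp : p < A.length
  · obtain ⟨j, hj, h1, h2⟩ := csOff_cover A n.toNat p (by rw [csOff_total hn]; exact hp)
    have hpo : p = csOff n A j + (p - csOff n A j) := by omega
    rw [hpo, ha j _ hj (by omega), csFlat_getElem n A n.toNat j _ hj (by omega)]
  · rw [List.getElem?_eq_none (by rw [hlenB, List.length_replicate]; omega),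
      List.getElem?_eq_none (by rw [csFlat_length, csOff_total hn]; omega)]


-- ===== VERDICT (by name: the statement is the Claim_ definition above) =====
theorem counting_sort_int_div_spec : Claim_equal_counting_sort_int_div := by
  intro A n _ hpre
  unfold Spec_counting_sort_int_div
  rcases hpre with h | ⟨hn, hA⟩
  · subst h; exact csNil n
  · exact csMain hn A hA
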